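-- pv_equiv track=rewrite | github.com/vikas-wadhwa/google_foobar | 2.2_peculiar_balance.py | answer
-- ===== SOURCE A (Python) =====
-- import math
--
-- def convert_to_backwards_ternary(decimal):
--
--     result = ''
--     x = decimal
--
--     while x > 0 :
--         result += str(int(x % 3))
--         x = math.floor(x / 3)
--
--     return result
--
-- def answer(x):
--
--     result = []
--     value = ''
--     additional = False
--     backwards_ternary_weight = convert_to_backwards_ternary(x)
--
--
--     ###############################################################################################################################
--     ## As we go from the lower to higher orders in the digits of a ternary number (normally right-to-left but here left-to-right):
--     ##
--     ##  -  A digit of 0 means there is no weight of this order needing to be added to the righthand scale.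
--     ##  -  A digit of 1 means that a weight of this order needs to be added to the righthand scale.
--     ##  -  Because we only have 1 of each weight, a digit of 2 means that an order of magnitude HIGER than this digit needs
--     ##     to be added to the righthand scale, but a there must be an amount equal to the current digit order added to the
--     ##     lefthand scale to compensate
--     ###############################################################################################################################
--     for n in backwards_ternary_weight:
--
--         if n == '0':
--             if additional:
--                 value = 'R'
--                 additional = False
--             else:
--                 value = '-'
--
--         if n == '1':
--             if additional:
--                 value = 'L'
--                 additional = True
--             else:
--                 value = 'R'
--
--         if n == '2':
--             if additional:
--                 value = '-'
--                 additional = True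
--             else:
--                 value = 'L'
--                 additional = True
--
--         result.append(value)
--
--
--     ####################################################################################################################
--     ## If we have reached the end of the original string and still have a leftover additional component, add it here
--     ####################################################################################################################
--     if additional:
--         result.append('R')
--
--
--
--     return result
-- ===== SOURCE B (Python) =====
-- def answer(x):
--     result = []
--     carry = 0
--     while x > 0:
--         v = x % 3 + carry
--         x = x // 3
--         if v == 0:
--             result.append('-')
--             carry = 0
--         elif v == 1:
--             result.append('R')
--             carry = 0
--         elif v == 2:
--             result.append('L')
--             carry = 1
--         else:
--             result.append('-')
--             carry = 1
--     if carry: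
--         result.append('R')
--     return result
-- ===== Notes on version B (the rewrite author's own statement) =====
-- stated objective: simpler
-- what changed: B replaces A's two-phase approach (build a backwards-ternary digit string, then run a delayed-write carry state machine over it) with one direct loop over x that emits '-'/'R'/'L' from digit+carry immediately, with no helper, no intermediate string and no trailing-value variable.
import Mathlib
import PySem

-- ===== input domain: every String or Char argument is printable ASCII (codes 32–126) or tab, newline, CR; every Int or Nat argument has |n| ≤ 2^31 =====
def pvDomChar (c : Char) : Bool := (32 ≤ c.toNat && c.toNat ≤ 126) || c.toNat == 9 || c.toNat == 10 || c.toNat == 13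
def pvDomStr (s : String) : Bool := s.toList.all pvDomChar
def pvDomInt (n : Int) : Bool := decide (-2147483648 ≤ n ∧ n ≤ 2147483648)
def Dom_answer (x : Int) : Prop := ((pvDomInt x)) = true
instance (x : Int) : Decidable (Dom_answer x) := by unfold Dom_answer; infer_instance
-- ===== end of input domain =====

-- B is a single carry-propagating loop over x itself (no ternary string built first); same return value, a structural simplification.

-- ===== PORT A =====
-- termination helper for both loops (x // 3 shrinks for positive x)
theorem pvFdLt (x : Int) (h : 0 < x) : (PySem.Int.floordiv x 3).toNat < x.toNat := by
  rw [PySem.Int.floordiv_eq_ediv_of_pos (by omega)]; omega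

-- math.floor(x / 3) is exactly floor division on the |x| ≤ 2^31 domain (floats are exact there)
def convert_to_backwards_ternary (x : Int) : List Char :=
  if h : 0 < x then
    PySem.Int.toChars (PySem.Int.mod x 3) ++ convert_to_backwards_ternary (PySem.Int.floordiv x 3)
  else []
termination_by x.toNat
decreasing_by exact pvFdLt x h

-- one iteration of A's for-loop: the three sequential ifs, then result.append(value)
def aStep (s : List String × String × Bool) (c : Char) : List String × String × Bool :=
  let result := s.1
  let value := s.2.1
  let additional := s.2.2
  let p1 : String × Bool :=
    if c = '0' then (if additional then ("R", false) else ("-", additional)) else (value, additional)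
  let p2 : String × Bool :=
    if c = '1' then (if p1.2 then ("L", true) else ("R", p1.2)) else p1
  let p3 : String × Bool :=
    if c = '2' then (if p2.2 then ("-", true) else ("L", true)) else p2
  (result ++ [p3.1], p3)

def answer (x : Int) : List String :=
  let bt := convert_to_backwards_ternary x
  let s := bt.foldl aStep ([], "", false)
  if s.2.2 then s.1 ++ ["R"] else s.1

-- ===== PORT B =====
def bLoop (x : Int) (carry : Int) : List String :=
  if h : 0 < x then
    let v := PySem.Int.mod x 3 + carry
    let x' := PySem.Int.floordiv x 3
    if v = 0 then "-" :: bLoop x' 0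
    else if v = 1 then "R" :: bLoop x' 0
    else if v = 2 then "L" :: bLoop x' 1
    else "-" :: bLoop x' 1
  else if carry ≠ 0 then ["R"] else []
termination_by x.toNat
decreasing_by all_goals exact pvFdLt x h

def answer_alt (x : Int) : List String := bLoop x 0

-- ===== PRECONDITION & SPEC =====
def Spec_answer (x : Int) (out : List String) : Prop := out = answer_alt x
instance (x : Int) (out : List String) : Decidable (Spec_answer x out) := by unfold Spec_answer; infer_instance

-- ===== CLAIM (what is proved, stated in full; the proofs are below) =====
def Claim_equal_answer : Prop := ∀ (x : Int), Dom_answer x → Spec_answer x (answer x)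

-- ===== LEMMAS AND PROOFS =====

-- the tail of A's loop with a non-empty accumulated result
theorem foldl_aStep_acc (l : List Char) (acc : List String) (v : String) (b : Bool) :
    l.foldl aStep (acc, v, b) =
      (acc ++ (l.foldl aStep ([], v, b)).1, (l.foldl aStep ([], v, b)).2) := by
  induction l generalizing acc v b with
  | nil => simp
  | cons c t ih =>
    simp only [List.foldl_cons]
    rw [show aStep (acc, v, b) c = (acc ++ [(aStep ([], v, b) c).2.1], (aStep ([], v, b) c).2) from by
          simp [aStep]]
    rw [show aStep ([], v, b) c = ([(aStep ([], v, b) c).2.1], (aStep ([], v, b) c).2) from by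
          simp [aStep]]
    obtain ⟨v', b'⟩ := (aStep ([], v, b) c).2
    rw [ih, ih [v'] v' b']
    simp

-- one-step evaluations of A's state machine (value/additional per digit and carry flag)
theorem aStep_0f (acc : List String) (v : String) : aStep (acc, v, false) '0' = (acc ++ ["-"], "-", false) := by simp [aStep]
theorem aStep_0t (acc : List String) (v : String) : aStep (acc, v, true) '0' = (acc ++ ["R"], "R", false) := by simp [aStep]
theorem aStep_1f (acc : List String) (v : String) : aStep (acc, v, false) '1' = (acc ++ ["R"], "R", false) := by simp [aStep]
theorem aStep_1t (acc : List String) (v : String) : aStep (acc, v, true) '1' = (acc ++ ["L"], "L", true) := by simp [aStep]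
theorem aStep_2f (acc : List String) (v : String) : aStep (acc, v, false) '2' = (acc ++ ["L"], "L", true) := by simp [aStep]
theorem aStep_2t (acc : List String) (v : String) : aStep (acc, v, true) '2' = (acc ++ ["-"], "-", true) := by simp [aStep]

-- main invariant: A's fold over the digit string, then the trailing 'R', equals B's carry loop
theorem pvMain : ∀ (n : Nat) (x : Int), x.toNat ≤ n → ∀ (v : String) (b : Bool),
    (let s := (convert_to_backwards_ternary x).foldl aStep ([], v, b);
     if s.2.2 then s.1 ++ ["R"] else s.1) = bLoop x (if b then 1 else 0) := by
  intro n
  induction n with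
  | zero =>
    intro x hx v b
    have hx0 : ¬ 0 < x := by omega
    rw [convert_to_backwards_ternary, bLoop]
    simp only [hx0, dif_neg, not_false_eq_true, List.foldl_nil]
    cases b <;> simp
  | succ n ih =>
    intro x hx v b
    by_cases hpos : 0 < x
    · have hr0 : 0 ≤ PySem.Int.mod x 3 := PySem.Int.mod_nonneg x (by omega)
      have hr3 : PySem.Int.mod x 3 < 3 := PySem.Int.mod_lt x (by omega)
      rw [convert_to_backwards_ternary, bLoop]
      simp only [hpos, dif_pos]
      set y := PySem.Int.floordiv x 3 with hy
      have hx' : y.toNat ≤ n := by have := pvFdLt x hpos; omega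
      have hcases : PySem.Int.mod x 3 = 0 ∨ PySem.Int.mod x 3 = 1 ∨ PySem.Int.mod x 3 = 2 := by
        omega
      rcases hcases with hr | hr | hr <;> rw [hr] <;> cases b <;>
        simp only [show PySem.Int.toChars 0 = ['0'] from rfl,
          show PySem.Int.toChars 1 = ['1'] from rfl,
          show PySem.Int.toChars 2 = ['2'] from rfl,
          List.cons_append, List.nil_append, List.foldl_cons,
          aStep_0f, aStep_0t, aStep_1f, aStep_1t, aStep_2f, aStep_2t] <;>
        rw [foldl_aStep_acc] <;>
        norm_num <;>
        first
          | (have h3 := ih y hx' "-" false; simp only [if_neg Bool.false_ne_true] at h3 ⊢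
             rw [← h3]; split <;> simp; done)
          | (have h3 := ih y hx' "R" false; simp only [if_neg Bool.false_ne_true] at h3 ⊢
             rw [← h3]; split <;> simp; done)
          | (have h3 := ih y hx' "L" true; simp only [if_true] at h3 ⊢
             rw [← h3]; split <;> simp; done)
          | (have h3 := ih y hx' "-" true; simp only [if_true] at h3 ⊢
             rw [← h3]; split <;> simp; done)
    · rw [convert_to_backwards_ternary, bLoop]
      simp only [hpos, dif_neg, not_false_eq_true, List.foldl_nil]
      cases b <;> simp

-- ===== VERDICT (by name: the statement is the Claim_ definition above) =====
theorem answer_spec : Claim_equal_answer := by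
  intro x _
  unfold Spec_answer answer answer_alt
  have h := pvMain x.toNat x (le_refl _) "" false
  simpa using h
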